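-- pv_equiv track=rewrite | github.com/FreCed2/PMS_react-nextjs_version | app/tasks/utils.py | generate_page_numbers
-- ===== SOURCE A (Python) =====
-- def generate_page_numbers(current_page, total_pages, left_edge=1, right_edge=1, left_current=2, right_current=2):
--     """
--     Generates a list of page numbers for pagination, including ellipses.
--
--     Args:
--         current_page (int): The current page number.
--         total_pages (int): Total number of pages.
--         left_edge (int): Number of pages to show at the left edge.
--         right_edge (int): Number of pages to show at the right edge.
--         left_current (int): Number of pages to show to the left of the current page.
--         right_current (int): Number of pages to show to the right of the current page.
--
--     Returns:
--         list: A list of page numbers or None for ellipses.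
--     """
--     result = []
--     last_page = 0
--
--     for page_num in range(1, total_pages + 1):
--         if (
--             page_num <= left_edge or
--             (page_num >= current_page - left_current and page_num <= current_page + right_current) or
--             page_num > total_pages - right_edge
--         ):
--             if last_page + 1 != page_num:
--                 result.append(None)  # Ellipsis
--             result.append(page_num)
--             last_page = page_num
--
--     return result
-- ===== SOURCE B (Python) =====
-- def _merge(a, b, rest):
--     # rest is sorted by start; extend (a, b) while the next window touches/overlaps it
--     if rest and rest[0][0] <= b + 1:
--         return _merge(a, max(b, rest[0][1]), rest[1:])
--     if rest:
--         return [(a, b)] + _merge(rest[0][0], rest[0][1], rest[1:])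
--     return [(a, b)]
--
--
-- def _emit(last, ivs):
--     # render merged windows, inserting None on a gap
--     if not ivs:
--         return []
--     a, b = ivs[0]
--     gap = [] if last + 1 == a else [None]
--     return gap + list(range(a, b + 1)) + _emit(b, ivs[1:])
--
--
-- def generate_page_numbers(current_page, total_pages, left_edge=1, right_edge=1, left_current=2, right_current=2):
--     windows = [(1, left_edge),
--                (current_page - left_current, current_page + right_current),
--                (total_pages - right_edge + 1, total_pages)]
--     clipped = [(max(1, a), min(total_pages, b)) for a, b in windows]
--     ivs = sorted([iv for iv in clipped if iv[0] <= iv[1]], key=lambda iv: iv[0])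
--     if not ivs:
--         return []
--     return _emit(0, _merge(ivs[0][0], ivs[0][1], ivs[1:]))
-- ===== Notes on version B (the rewrite author's own statement) =====
-- stated objective: faster
-- what changed: Instead of scanning every page 1..total_pages and testing each against the three windows, B clips the three windows to [1, total_pages], sorts them by start, merges touching/overlapping ones, and emits each merged run directly with ellipses on gaps.
import Mathlib
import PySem

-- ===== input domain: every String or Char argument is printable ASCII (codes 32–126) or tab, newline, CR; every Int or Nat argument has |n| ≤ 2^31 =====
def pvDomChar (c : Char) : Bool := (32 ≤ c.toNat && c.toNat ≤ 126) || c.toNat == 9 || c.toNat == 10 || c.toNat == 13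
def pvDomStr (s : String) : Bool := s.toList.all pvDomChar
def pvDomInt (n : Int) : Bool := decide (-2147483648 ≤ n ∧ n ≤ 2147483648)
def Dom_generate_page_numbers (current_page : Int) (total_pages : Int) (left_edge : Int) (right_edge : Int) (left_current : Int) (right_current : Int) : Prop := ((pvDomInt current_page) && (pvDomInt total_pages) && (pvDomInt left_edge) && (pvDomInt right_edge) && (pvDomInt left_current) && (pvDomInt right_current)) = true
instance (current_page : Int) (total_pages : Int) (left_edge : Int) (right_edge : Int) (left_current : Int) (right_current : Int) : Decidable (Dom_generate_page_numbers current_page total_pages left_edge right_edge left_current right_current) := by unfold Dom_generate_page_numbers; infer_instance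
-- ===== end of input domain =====

-- B replaces A's scan over all pages by merging three clipped windows and emitting only the
-- O(k) shown pages with ellipses on gaps (objective: faster, O(total_pages) → O(output)).

-- ===== PORT A =====
-- literal port of A: one pass over range(1, total_pages+1), appending None on a gap
def generate_page_numbers (current_page : Int) (total_pages : Int) (left_edge : Int) (right_edge : Int) (left_current : Int) (right_current : Int) : List (Option Int) :=
  ((PySem.List.pyRange 1 (total_pages + 1) 1).foldl
    (fun st page_num =>
      if page_num ≤ left_edge ∨
         (page_num ≥ current_page - left_current ∧ page_num ≤ current_page + right_current) ∨
         page_num > total_pages - right_edge then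
        (st.1 ++ (if st.2 + 1 ≠ page_num then [none] else []) ++ [some page_num], page_num)
      else st)
    ([], 0)).1

-- ===== PORT B =====
-- _merge(a, b, rest): rest sorted by start; extend (a, b) while the next window touches/overlaps
def mergeIvs (a : Int) (b : Int) : List (Int × Int) → List (Int × Int)
  | [] => [(a, b)]
  | (a2, b2) :: rest =>
      if a2 ≤ b + 1 then mergeIvs a (max b b2) rest
      else (a, b) :: mergeIvs a2 b2 rest

-- _emit(last, ivs): render merged windows, inserting None on a gap
def emitIvs (last : Int) : List (Int × Int) → List (Option Int)
  | [] => []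
  | (a, b) :: rest =>
      (if last + 1 = a then [] else [none]) ++ (PySem.List.pyRange a (b + 1) 1).map some ++ emitIvs b rest

def generate_page_numbers_alt (current_page : Int) (total_pages : Int) (left_edge : Int) (right_edge : Int) (left_current : Int) (right_current : Int) : List (Option Int) :=
  let windows : List (Int × Int) :=
    [(1, left_edge),
     (current_page - left_current, current_page + right_current),
     (total_pages - right_edge + 1, total_pages)]
  let clipped := windows.map (fun iv => (max 1 iv.1, min total_pages iv.2))
  let ivs := PySem.List.sorted (clipped.filter (fun iv => iv.1 ≤ iv.2)) (fun iv => iv.1) false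
  match ivs with
  | [] => []
  | (a, b) :: rest => emitIvs 0 (mergeIvs a b rest)

-- ===== PRECONDITION & SPEC =====
def Spec_generate_page_numbers (current_page : Int) (total_pages : Int) (left_edge : Int) (right_edge : Int) (left_current : Int) (right_current : Int) (out : List (Option Int)) : Prop := out = generate_page_numbers_alt current_page total_pages left_edge right_edge left_current right_current
instance (current_page : Int) (total_pages : Int) (left_edge : Int) (right_edge : Int) (left_current : Int) (right_current : Int) (out : List (Option Int)) : Decidable (Spec_generate_page_numbers current_page total_pages left_edge right_edge left_current right_current out) := by unfold Spec_generate_page_numbers; infer_instance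

-- ===== CLAIM (what is proved, stated in full; the proofs are below) =====
def Claim_equal_generate_page_numbers : Prop := ∀ (current_page : Int) (total_pages : Int) (left_edge : Int) (right_edge : Int) (left_current : Int) (right_current : Int), Dom_generate_page_numbers current_page total_pages left_edge right_edge left_current right_current → Spec_generate_page_numbers current_page total_pages left_edge right_edge left_current right_current (generate_page_numbers current_page total_pages left_edge right_edge left_current right_current)

-- ===== LEMMAS AND PROOFS =====

-- canonical rendering of an increasing page list with ellipses on gaps
def render (last : Int) : List Int → List (Option Int)
  | [] => []
  | p :: ps => (if last + 1 = p then [] else [none]) ++ some p :: render p ps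

-- A's fold, over any page list, is `render` of the filtered list
theorem foldA_eq_render (Q : Int → Prop) [DecidablePred Q] :
    ∀ (ℓ : List Int) (res : List (Option Int)) (last : Int),
      (ℓ.foldl
        (fun st p =>
          if Q p then (st.1 ++ (if st.2 + 1 ≠ p then [none] else []) ++ [some p], p) else st)
        (res, last)).1
      = res ++ render last (ℓ.filter (fun p => decide (Q p))) := by
  intro ℓ
  induction ℓ with
  | nil => intro res last; simp [render]
  | cons p ps ih =>
      intro res last
      by_cases hq : Q p
      · simp only [List.foldl_cons, List.filter_cons, hq, if_true, decide_true]
        rw [ih]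
        by_cases hg : last + 1 = p
        · simp [render, hg]
        · simp [render, hg]
      · simp only [List.foldl_cons, List.filter_cons, hq, decide_false]
        exact ih res last

-- render over one contiguous run of pages
theorem render_run (a b last : Int) (rest : List Int) (h : a ≤ b) :
    render last (PySem.List.pyRange a (b + 1) 1 ++ rest)
    = (if last + 1 = a then [] else [none]) ++ (PySem.List.pyRange a (b + 1) 1).map some ++ render b rest := by
  have hn : (b - a).toNat = (b - a).toNat := rfl
  generalize hk : (b - a).toNat = k at hn
  clear hn
  induction k generalizing a last with
  | zero =>
      have hab : a = b := by omega
      subst hab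
      rw [PySem.List.pyRange_one_cons (by omega), PySem.List.pyRange_one_eq_nil (by omega)]
      simp [render]
  | succ k ih =>
      have hlt : a < b := by omega
      rw [PySem.List.pyRange_one_cons (by omega)]
      simp only [List.cons_append, render, List.map_cons]
      rw [ih (a + 1) a (by omega) (by omega)]
      simp

-- emit = render of the concatenated pages, for nonempty windows
theorem emit_eq_render :
    ∀ (ivs : List (Int × Int)) (last : Int), (∀ iv ∈ ivs, iv.1 ≤ iv.2) →
      emitIvs last ivs
      = render last ((ivs.map (fun iv => PySem.List.pyRange iv.1 (iv.2 + 1) 1)).flatten) := by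
  intro ivs
  induction ivs with
  | nil => intro last _; simp [emitIvs, render]
  | cons iv rest ih =>
      intro last hne
      obtain ⟨a, b⟩ := iv
      have hab : a ≤ b := hne (a, b) (by simp)
      simp only [emitIvs, List.map_cons, List.flatten_cons]
      rw [render_run a b last _ hab, ih b (fun iv h => hne iv (by simp [h]))]

-- p is covered by one of the windows
def covered (p : Int) (ivs : List (Int × Int)) : Prop := ∃ iv ∈ ivs, iv.1 ≤ p ∧ p ≤ iv.2

theorem covered_cons (p : Int) (iv : Int × Int) (ivs : List (Int × Int)) :
    covered p (iv :: ivs) ↔ (iv.1 ≤ p ∧ p ≤ iv.2) ∨ covered p ivs := by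
  constructor
  · rintro ⟨j, hj, hp⟩
    rcases List.mem_cons.mp hj with h | h
    · subst h; exact Or.inl hp
    · exact Or.inr ⟨j, h, hp⟩
  · rintro (h | ⟨j, hj, hp⟩)
    · exact ⟨iv, by simp, h⟩
    · exact ⟨j, by simp [hj], hp⟩

-- every window produced by mergeIvs starts at or after a
theorem merge_start_lb (a b : Int) :
    ∀ (rest : List (Int × Int)), ((a, b) :: rest).Pairwise (fun x y => x.1 ≤ y.1) →
      ∀ iv ∈ mergeIvs a b rest, a ≤ iv.1 := by
  intro rest
  induction rest generalizing a b with
  | nil =>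
      intro _ iv hiv
      obtain ⟨x, y⟩ := iv
      simp [mergeIvs] at hiv
      omega
  | cons iv2 rest' ih =>
      intro hs iv hiv
      obtain ⟨a2, b2⟩ := iv2
      simp only [List.pairwise_cons] at hs
      obtain ⟨h1, h2, h3⟩ := hs
      have ha2 : a ≤ a2 := h1 (a2, b2) (by simp)
      unfold mergeIvs at hiv
      split_ifs at hiv with hm
      · exact ih a (max b b2)
          (by
            simp only [List.pairwise_cons]
            exact ⟨fun y hy => h1 y (by simp [hy]), h3⟩) iv hiv
      · rcases List.mem_cons.mp hiv with h | h
        · subst h; omega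
        · have := ih a2 b2 (by simp only [List.pairwise_cons]; exact ⟨h2, h3⟩) iv h
          omega

-- mergeIvs preserves window nonemptiness
theorem merge_nonempty (a b : Int) :
    ∀ (rest : List (Int × Int)), a ≤ b → (∀ iv ∈ rest, iv.1 ≤ iv.2) →
      ∀ iv ∈ mergeIvs a b rest, iv.1 ≤ iv.2 := by
  intro rest
  induction rest generalizing a b with
  | nil =>
      intro hab _ iv hiv
      obtain ⟨x, y⟩ := iv
      simp [mergeIvs] at hiv
      omega
  | cons iv2 rest' ih =>
      intro hab hne iv hiv
      obtain ⟨a2, b2⟩ := iv2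
      have h2 : a2 ≤ b2 := hne (a2, b2) (by simp)
      unfold mergeIvs at hiv
      split_ifs at hiv with hm
      · exact ih a (max b b2) (by omega) (fun y hy => hne y (by simp [hy])) iv hiv
      · rcases List.mem_cons.mp hiv with h | h
        · subst h; exact hab
        · exact ih a2 b2 h2 (fun y hy => hne y (by simp [hy])) iv h

-- membership in mergeIvs' windows = membership in the input windows
theorem merge_mem (p : Int) :
    ∀ (rest : List (Int × Int)) (a b : Int), ((a, b) :: rest).Pairwise (fun x y => x.1 ≤ y.1) →
      (covered p (mergeIvs a b rest) ↔ covered p ((a, b) :: rest)) := by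
  intro rest
  induction rest with
  | nil => intro a b _; simp [mergeIvs]
  | cons iv2 rest' ih =>
      intro a b hs
      obtain ⟨a2, b2⟩ := iv2
      simp only [List.pairwise_cons] at hs
      obtain ⟨h1, h2, h3⟩ := hs
      have ha2 : a ≤ a2 := h1 (a2, b2) (by simp)
      unfold mergeIvs
      split_ifs with hm
      · rw [ih a (max b b2)
          (by simp only [List.pairwise_cons]; exact ⟨fun y hy => h1 y (by simp [hy]), h3⟩)]
        rw [covered_cons, covered_cons, covered_cons]
        constructor
        · rintro (h | h)
          · by_cases hpb : p ≤ b
            · exact Or.inl ⟨h.1, hpb⟩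
            · simp only [le_max_iff] at h
              exact Or.inr (Or.inl ⟨by omega, by omega⟩)
          · exact Or.inr (Or.inr h)
        · rintro (h | h | h)
          · exact Or.inl ⟨h.1, le_trans h.2 (le_max_left _ _)⟩
          · exact Or.inl ⟨by omega, le_trans h.2 (le_max_right _ _)⟩
          · exact Or.inr h
      · rw [covered_cons, covered_cons, covered_cons,
          ih a2 b2 (by simp only [List.pairwise_cons]; exact ⟨h2, h3⟩), covered_cons]

-- the concatenated pages of the merged windows are strictly increasing
theorem merge_flatten_pairwise :
    ∀ (rest : List (Int × Int)) (a b : Int), ((a, b) :: rest).Pairwise (fun x y => x.1 ≤ y.1) →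
      ((mergeIvs a b rest).map (fun iv => PySem.List.pyRange iv.1 (iv.2 + 1) 1)).flatten.Pairwise (· < ·) := by
  intro rest
  induction rest with
  | nil =>
      intro a b _
      simp only [mergeIvs, List.map_cons, List.map_nil, List.flatten_cons, List.flatten_nil,
        List.append_nil]
      exact PySem.List.pairwise_lt_pyRange_one _ _
  | cons iv2 rest' ih =>
      intro a b hs
      obtain ⟨a2, b2⟩ := iv2
      simp only [List.pairwise_cons] at hs
      obtain ⟨h1, h2, h3⟩ := hs
      unfold mergeIvs
      split_ifs with hm
      · exact ih a (max b b2)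
          (by simp only [List.pairwise_cons]; exact ⟨fun y hy => h1 y (by simp [hy]), h3⟩)
      · simp only [List.map_cons, List.flatten_cons]
        have hpw : (((mergeIvs a2 b2 rest').map (fun iv => PySem.List.pyRange iv.1 (iv.2 + 1) 1)).flatten).Pairwise (· < ·) :=
          ih a2 b2 (by simp only [List.pairwise_cons]; exact ⟨h2, h3⟩)
        apply List.pairwise_append.mpr
        refine ⟨PySem.List.pairwise_lt_pyRange_one _ _, hpw, ?_⟩
        intro x hx y hy
        have hxb : x < b + 1 := (PySem.List.mem_pyRange_one.mp hx).2
        obtain ⟨l, hl, hyl⟩ := List.mem_flatten.mp hy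
        obtain ⟨iv, hiv, rfl⟩ := List.mem_map.mp hl
        have hya : iv.1 ≤ y := (PySem.List.mem_pyRange_one.mp hyl).1
        have ha2iv : a2 ≤ iv.1 :=
          merge_start_lb a2 b2 rest' (by simp only [List.pairwise_cons]; exact ⟨h2, h3⟩) iv hiv
        omega

-- ===== VERDICT (by name: the statement is the Claim_ definition above) =====
theorem generate_page_numbers_spec : Claim_equal_generate_page_numbers := by
  intro c N le re lc rc _
  unfold Spec_generate_page_numbers generate_page_numbers generate_page_numbers_alt
  rw [foldA_eq_render
      (fun p => p ≤ le ∨ (p ≥ c - lc ∧ p ≤ c + rc) ∨ p > N - re)]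
  simp only [List.nil_append]
  set Q : Int → Prop := fun p => p ≤ le ∨ (p ≥ c - lc ∧ p ≤ c + rc) ∨ p > N - re with hQ
  set clipped : List (Int × Int) :=
    [((1 : Int), le), (c - lc, c + rc), (N - re + 1, N)].map
      (fun iv => (max 1 iv.1, min N iv.2)) with hclipped
  set ivs := PySem.List.sorted (clipped.filter (fun iv => decide (iv.1 ≤ iv.2)))
      (fun iv => iv.1) false with hivs
  -- membership characterisation of the clipped, filtered windows
  have hmemivs : ∀ p : Int, covered p ivs ↔ (1 ≤ p ∧ p ≤ N ∧ Q p) := by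
    intro p
    constructor
    · rintro ⟨iv, hiv, hp⟩
      rw [hivs, PySem.List.mem_sorted] at hiv
      have := List.mem_filter.mp hiv
      rw [hclipped] at this
      simp only [List.mem_map, List.mem_cons] at this
      obtain ⟨⟨w, hw, rfl⟩, _⟩ := this
      rcases hw with h | h | h | h <;>
        (first | (subst h; simp only [hQ]; simp at hp ⊢; omega) | simp at h)
    · rintro ⟨h1, h2, hq⟩
      rw [hQ] at hq
      rcases hq with h | h | h
      · refine ⟨(max 1 1, min N le), ?_, by simp; omega⟩
        rw [hivs, PySem.List.mem_sorted, List.mem_filter]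
        constructor
        · rw [hclipped]; simp only [List.mem_map]; exact ⟨(1, le), by simp, rfl⟩
        · simp; omega
      · refine ⟨(max 1 (c - lc), min N (c + rc)), ?_, by simp; omega⟩
        rw [hivs, PySem.List.mem_sorted, List.mem_filter]
        constructor
        · rw [hclipped]; simp only [List.mem_map]; exact ⟨(c - lc, c + rc), by simp, rfl⟩
        · simp; omega
      · refine ⟨(max 1 (N - re + 1), min N N), ?_, by simp; omega⟩
        rw [hivs, PySem.List.mem_sorted, List.mem_filter]
        constructor
        · rw [hclipped]; simp only [List.mem_map]; exact ⟨(N - re + 1, N), by simp, rfl⟩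
        · simp; omega
  have hne_ivs : ∀ iv ∈ ivs, iv.1 ≤ iv.2 := by
    intro iv hiv
    rw [hivs, PySem.List.mem_sorted] at hiv
    have := (List.mem_filter.mp hiv).2
    simpa using this
  have hpair : ivs.Pairwise (fun x y : Int × Int => x.1 ≤ y.1) :=
    PySem.List.sorted_pairwise _ _
  -- the filtered page list of A
  set L1 := (PySem.List.pyRange 1 (N + 1) 1).filter (fun p => decide (Q p)) with hL1
  have hL1mem : ∀ p : Int, p ∈ L1 ↔ (1 ≤ p ∧ p ≤ N ∧ Q p) := by
    intro p
    rw [hL1, List.mem_filter, PySem.List.mem_pyRange_one]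
    constructor
    · rintro ⟨⟨ha, hb⟩, hq⟩; exact ⟨ha, by omega, of_decide_eq_true hq⟩
    · rintro ⟨ha, hb, hq⟩; exact ⟨⟨ha, by omega⟩, decide_eq_true hq⟩
  have hL1pw : L1.Pairwise (· < ·) :=
    List.Pairwise.filter _ (PySem.List.pairwise_lt_pyRange_one _ _)
  match hmatch : ivs with
  | [] =>
      have : L1 = [] := by
        apply List.eq_nil_iff_forall_not_mem.mpr
        intro p hp
        obtain ⟨iv, hiv, -⟩ := (hmemivs p).mpr ((hL1mem p).mp hp)
        simp at hiv
      rw [this]; rfl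
  | (a, b) :: rest =>
      -- B's page list
      set L2 := ((mergeIvs a b rest).map (fun iv => PySem.List.pyRange iv.1 (iv.2 + 1) 1)).flatten
        with hL2
      have hpair' : ((a, b) :: rest).Pairwise (fun x y : Int × Int => x.1 ≤ y.1) := hpair
      have hne' : ∀ iv ∈ (a, b) :: rest, iv.1 ≤ iv.2 := hne_ivs
      have hL2mem : ∀ p : Int, p ∈ L2 ↔ (1 ≤ p ∧ p ≤ N ∧ Q p) := by
        intro p
        rw [← hmemivs p]
        rw [hL2, ← merge_mem p rest a b hpair']
        constructor
        · intro hp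
          obtain ⟨l, hl, hpl⟩ := List.mem_flatten.mp hp
          obtain ⟨iv, hiv, rfl⟩ := List.mem_map.mp hl
          have := PySem.List.mem_pyRange_one.mp hpl
          exact ⟨iv, hiv, this.1, by omega⟩
        · rintro ⟨iv, hiv, hp⟩
          exact List.mem_flatten.mpr
            ⟨PySem.List.pyRange iv.1 (iv.2 + 1) 1, List.mem_map.mpr ⟨iv, hiv, rfl⟩,
              PySem.List.mem_pyRange_one.mpr ⟨hp.1, by omega⟩⟩
      have hL2pw : L2.Pairwise (· < ·) := merge_flatten_pairwise rest a b hpair'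
      have hLeq : L1 = L2 := by
        have hperm : L1.Perm L2 :=
          (List.perm_ext_iff_of_nodup
            (hL1pw.imp ne_of_lt) (hL2pw.imp ne_of_lt)).mpr
            (fun p => by rw [hL1mem p, hL2mem p])
        exact List.Perm.eq_of_pairwise
          (fun x y _ _ h1 h2 => absurd h2 (by omega)) hL1pw hL2pw hperm
      show render 0 L1 = emitIvs 0 (mergeIvs a b rest)
      rw [emit_eq_render (mergeIvs a b rest) 0
          (merge_nonempty a b rest (hne' (a, b) (by simp)) (fun iv h => hne' iv (by simp [h])))]
      rw [← hL2, ← hLeq]
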